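-- pv_equiv track=rewrite | github.com/d4rth-f4der/Univer_python | Lect-04/Lect-04-08.py | min_arg_fact
-- ===== SOURCE A (Python) =====
-- def min_arg_fact(a: int) -> int:
--     """
--     Return min {n / n!>a}
--     """
--     if a < 0:
--         return 0
--     n = 1
--     fact = 1    # Інваріант: fact = (n-1)!
--     while fact <= a:
--         fact *= n
--         n += 1
--     return n - 1
-- ===== SOURCE B (Python) =====
-- import math
-- import itertools
--
-- def min_arg_fact(a: int) -> int:
--     for n in itertools.count(0):
--         if math.factorial(n) > a:
--             return n
-- ===== Notes on version B (the rewrite author's own statement) =====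
-- stated objective: simpler
-- what changed: Replaced the running-product invariant loop and the explicit a<0 special case with a single scan over n=0,1,2,... returning the first n with math.factorial(n) > a; the negative case falls out of the general test.
import Mathlib
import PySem

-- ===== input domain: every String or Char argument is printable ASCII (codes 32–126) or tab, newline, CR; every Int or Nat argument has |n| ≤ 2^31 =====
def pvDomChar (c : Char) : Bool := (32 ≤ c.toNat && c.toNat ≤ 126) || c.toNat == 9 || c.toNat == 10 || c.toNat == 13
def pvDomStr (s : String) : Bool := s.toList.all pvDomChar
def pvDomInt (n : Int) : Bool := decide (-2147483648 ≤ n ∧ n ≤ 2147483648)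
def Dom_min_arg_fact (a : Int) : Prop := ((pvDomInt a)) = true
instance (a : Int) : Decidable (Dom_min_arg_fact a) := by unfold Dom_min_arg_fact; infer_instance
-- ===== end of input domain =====

-- B drops A's running-product invariant and the a<0 special case: it returns the
-- first n ≥ 0 with factorial(n) > a; same return value, simpler decomposition.

-- ===== PORT A =====
-- A's while loop; the fuel (a.toNat + 2) is a totality guard only and is never
-- exhausted on any input (the loop exits by its own test first).
def minArgFactLoopA : Nat → Int → Int → Int → Int
  | 0, n, _, _ => n - 1
  | fuel + 1, n, fact, a => if fact ≤ a then minArgFactLoopA fuel (n + 1) (fact * n) a else n - 1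

def min_arg_fact (a : Int) : Int :=
  if a < 0 then 0
  else minArgFactLoopA (a.toNat + 2) 1 1 a

-- ===== PORT B =====
-- B's `for n in itertools.count(0)` with `math.factorial`; same totality guard.
def minArgFactLoopB : Nat → Nat → Int → Int
  | 0, n, _ => (n : Int)
  | fuel + 1, n, a => if (Nat.factorial n : Int) > a then (n : Int) else minArgFactLoopB fuel (n + 1) a

def min_arg_fact_alt (a : Int) : Int :=
  minArgFactLoopB (a.toNat + 2) 0 a

-- ===== PRECONDITION & SPEC =====
def Spec_min_arg_fact (a : Int) (out : Int) : Prop := out = min_arg_fact_alt a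
instance (a : Int) (out : Int) : Decidable (Spec_min_arg_fact a out) := by unfold Spec_min_arg_fact; infer_instance

-- ===== CLAIM (what is proved, stated in full; the proofs are below) =====
def Claim_equal_min_arg_fact : Prop := ∀ (a : Int), Dom_min_arg_fact a → Spec_min_arg_fact a (min_arg_fact a)

-- ===== LEMMAS AND PROOFS =====

-- Invariant linking the two loops: A's state (n, fact) with n = m+1, fact = m!
-- corresponds to B's counter m, for any common fuel.
theorem minArgFact_loops_eq (fuel : Nat) :
    ∀ (m : Nat) (a : Int),
      minArgFactLoopA fuel ((m : Int) + 1) (Nat.factorial m : Int) a = minArgFactLoopB fuel m a := by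
  induction fuel with
  | zero =>
      intro m a
      simp [minArgFactLoopA, minArgFactLoopB]
  | succ k ih =>
      intro m a
      simp only [minArgFactLoopA, minArgFactLoopB]
      by_cases h : (Nat.factorial m : Int) ≤ a
      · rw [if_pos h, if_neg (by omega)]
        have hfact : (Nat.factorial m : Int) * ((m : Int) + 1) = (Nat.factorial (m + 1) : Int) := by
          rw [Nat.factorial_succ]; push_cast; ring
        have := ih (m + 1) a
        push_cast at this ⊢
        rw [hfact]
        convert this using 2
      · rw [if_neg h, if_pos (by omega)]
        omega

-- ===== VERDICT (by name: the statement is the Claim_ definition above) =====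
theorem min_arg_fact_spec : Claim_equal_min_arg_fact := by
  intro a _
  show min_arg_fact a = min_arg_fact_alt a
  unfold min_arg_fact min_arg_fact_alt
  by_cases h : a < 0
  · rw [if_pos h]
    have ht : a.toNat = 0 := Int.toNat_of_nonpos (le_of_lt h)
    rw [ht]
    simp [minArgFactLoopB, Nat.factorial]
    omega
  · rw [if_neg h]
    have := minArgFact_loops_eq (a.toNat + 2) 0 a
    simpa [Nat.factorial] using this
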